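-- pv_equiv track=rewrite | github.com/alexandraback/datacollection | solutions_5765824346324992_0/Python/niceEmptyBrain/prob_b.py | main_job
-- ===== SOURCE A (Python) =====
-- def lcm(x, y):
--     if x > y:
--         greater = x
--     else:
--         greater = y
--
--     while(True):
--         if((greater % x == 0) and (greater % y == 0)):
--             lcm = greater
--             break
--         greater += 1
--
--     return lcm
--
-- def main_job(n, b, m):
--     occupied = [0]*b
--
--     ll = m[0]
--     for i in range(b-1):
--         ll = lcm(ll, m[i+1])
--
--     count = 0
--     assign = []
--     while True:
--         curr = occupied.index(min(occupied))
--         occupied[curr] += m[curr]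
--         assign.append(curr)
--         flag = True
--         for i in range(b):
--             if occupied[i] != ll:
--                 flag = False
--         if flag:
--             break
--
--     idx = (n-1) % len(assign)
--     return assign[idx]+1
-- ===== SOURCE B (Python) =====
-- from math import gcd
--
-- def main_job(n, b, m):
--     ll = m[0]
--     for i in range(b - 1):
--         v = m[i + 1]
--         ll = ll * v // gcd(ll, v)
--     events = sorted((j * m[i], i) for i in range(b) for j in range(ll // m[i]))
--     idx = (n - 1) % len(events)
--     return events[idx][1] + 1
-- ===== Notes on version B (the rewrite author's own statement) =====
-- stated objective: alternative
-- what changed: B computes the lcm with Euclid's gcd instead of A's increment-and-test search and replaces A's whole min-bucket simulation by sorting the multiples (j*m[i], i) once and indexing into the sorted list, removing both the lcm-sized linear search and the per-step min/index/flag scans.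
-- outside the precondition, e.g. on main_job(1, 1, [0]): A returns 1, B raises ZeroDivisionError; on main_job(1, 2, [3, -2]): A does not finish within the time limit, B returns 2
import Mathlib
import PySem

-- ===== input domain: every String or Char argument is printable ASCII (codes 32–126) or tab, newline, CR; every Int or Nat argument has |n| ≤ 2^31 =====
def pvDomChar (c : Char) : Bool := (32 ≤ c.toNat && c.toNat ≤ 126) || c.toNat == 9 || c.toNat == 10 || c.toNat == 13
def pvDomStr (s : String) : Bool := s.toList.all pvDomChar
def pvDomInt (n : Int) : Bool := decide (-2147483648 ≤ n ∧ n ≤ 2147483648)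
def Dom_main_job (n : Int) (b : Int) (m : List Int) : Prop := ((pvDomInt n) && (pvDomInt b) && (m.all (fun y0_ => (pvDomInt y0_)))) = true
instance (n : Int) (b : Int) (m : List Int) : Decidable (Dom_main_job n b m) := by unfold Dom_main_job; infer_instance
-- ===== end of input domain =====

-- B replaces A's increment-and-test lcm search by a gcd-based lcm and A's whole min-bucket
-- simulation by sorting the multiples (j*m[i], i) once and indexing into the sorted list
-- (objective: alternative algorithm; fewer passes, speed not measured).


-- ===== PORT A =====
-- A's lcm helper: linear search upward from max(x,y); the fuel argument (not in the Python)
-- only makes the loop total — inside Pre_ the search ends before the fuel runs out.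
def lcmA_go (x y greater : Int) : Nat → Int
  | 0 => 0
  | f+1 =>
    if PySem.Int.mod greater x = 0 ∧ PySem.Int.mod greater y = 0 then greater
    else lcmA_go x y (greater + 1) f

def lcmA (x y : Int) : Int :=
  let greater := if x > y then x else y
  lcmA_go x y greater (x.natAbs * y.natAbs + 1)


-- A's while-loop: serve the first minimal bucket, add its period, append its index, stop when
-- every bucket equals ll; the fuel argument (not in the Python) only makes the loop total.
def simLoop (m : List Int) (b ll : Int) : Nat → List Int → List Int → List Int
  | 0, _, assign => assign
  | f+1, occupied, assign =>
    let mn := (PySem.List.min? occupied (fun x => x)).getD 0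
    let curr := (PySem.List.index? occupied mn).getD 0
    let occ' := occupied.set curr (occupied.getD curr 0 + PySem.List.pyGetD m (curr : Int) 0)
    let assign' := assign ++ [(curr : Int)]
    let flag := (PySem.List.pyRange 0 b 1).foldl
        (fun fl i => if PySem.List.pyGetD occ' i 0 ≠ ll then false else fl) true
    if flag then assign' else simLoop m b ll f occ' assign'

def main_job (n : Int) (b : Int) (m : List Int) : Int :=
  let occupied : List Int := PySem.List.pyRepeat [0] b
  let ll0 := PySem.List.pyGetD m 0 0
  let ll := (PySem.List.pyRange 0 (b-1) 1).foldl
      (fun ll i => lcmA ll (PySem.List.pyGetD m (i+1) 0)) ll0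
  let assign := simLoop m b ll (ll.natAbs * b.toNat + 1) occupied []
  let idx := PySem.Int.mod (n-1) assign.length
  PySem.List.pyGetD assign idx 0 + 1

def main_job_alt (n : Int) (b : Int) (m : List Int) : Int :=
  let ll0 := PySem.List.pyGetD m 0 0
  let ll := (PySem.List.pyRange 0 (b-1) 1).foldl
      (fun ll i =>
        let v := PySem.List.pyGetD m (i+1) 0
        PySem.Int.floordiv (ll * v) (Int.gcd ll v)) ll0
  let events := (PySem.List.pyRange 0 b 1).flatMap
      (fun i => (PySem.List.pyRange 0 (PySem.Int.floordiv ll (PySem.List.pyGetD m i 0)) 1).map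
        (fun j => (j * PySem.List.pyGetD m i 0, i)))
  let eventsS := PySem.List.sorted2 events (fun p => p.1) (fun p => p.2)
  let idx := PySem.Int.mod (n-1) (eventsS.length : Int)
  (PySem.List.pyGetD eventsS idx (0, 0)).2 + 1


-- ===== PRECONDITION & SPEC =====
-- Pre_ excludes nonpositive bucket periods among the first b (and b outside 1..len(m)),
-- except the degenerate single-bucket case b = 1 with m[0] ≠ 0, which both programs handle:
-- with a nonpositive period A's scheduling loop (or its lcm search) diverges for every b ≥ 2,
-- and at the one remaining excluded returning point (b = 1, m[0] = 0) A still returns 1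
-- while B's exact lcm arithmetic divides by zero, so B cannot match it.
def Pre_main_job (n : Int) (b : Int) (m : List Int) : Prop :=
  1 ≤ b ∧ b ≤ (m.length : Int) ∧
    ((∀ x ∈ m.take b.toNat, 1 ≤ x) ∨ (b = 1 ∧ m.getD 0 0 ≠ 0))
instance (n : Int) (b : Int) (m : List Int) : Decidable (Pre_main_job n b m) := by
  unfold Pre_main_job; infer_instance

def pvWitness_main_job : Int × Int × List Int := (3, 2, [2, 3])

def Spec_main_job (n : Int) (b : Int) (m : List Int) (out : Int) : Prop := out = main_job_alt n b m
instance (n : Int) (b : Int) (m : List Int) (out : Int) : Decidable (Spec_main_job n b m out) := by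
  unfold Spec_main_job; infer_instance

-- ===== CLAIM (what is proved, stated in full; the proofs are below) =====
def Claim_equal_main_job : Prop := ∀ (n : Int) (b : Int) (m : List Int),
  Dom_main_job n b m → Pre_main_job n b m → Spec_main_job n b m (main_job n b m)

-- ===== LEMMAS AND PROOFS =====
lemma lcmA_go_eq (x y : Int) (hx : 0 < x) (hy : 0 < y) :
    ∀ (f : Nat) (g : Int), 0 < g → g ≤ (Int.lcm x y : Int) →
      ((Int.lcm x y : Int) - g).toNat < f → lcmA_go x y g f = (Int.lcm x y : Int) := by
  intro f
  induction f with
  | zero => intro g _ _ h; omega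
  | succ f ih =>
    intro g hg hgle hf
    simp only [lcmA_go, PySem.Int.mod_eq_zero_iff_dvd]
    by_cases h : x ∣ g ∧ y ∣ g
    · simp only [h, and_self, if_true]
      have hg' : g = (g.toNat : Int) := by omega
      have hdvd : (Int.lcm x y : Int) ∣ g := by
        rw [hg']
        exact_mod_cast Int.lcm_dvd (by rw [← hg']; exact h.1) (by rw [← hg']; exact h.2)
      have := Int.le_of_dvd hg hdvd
      omega
    · simp only [h, if_false]
      have hne : g ≠ (Int.lcm x y : Int) := by
        rintro rfl
        exact h ⟨Int.dvd_lcm_left x y, Int.dvd_lcm_right x y⟩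
      exact ih (g + 1) (by omega) (by omega) (by omega)

lemma lcmA_eq (x y : Int) (hx : 0 < x) (hy : 0 < y) : lcmA x y = (Int.lcm x y : Int) := by
  have hxlcm : x ≤ (Int.lcm x y : Int) := by
    have hpos : 0 < (Int.lcm x y : Int) := by
      have := Nat.lcm_pos (m := x.natAbs) (n := y.natAbs) (by omega) (by omega)
      exact_mod_cast this
    exact Int.le_of_dvd hpos (Int.dvd_lcm_left x y)
  have hylcm : y ≤ (Int.lcm x y : Int) := by
    have hpos : 0 < (Int.lcm x y : Int) := by
      have := Nat.lcm_pos (m := x.natAbs) (n := y.natAbs) (by omega) (by omega)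
      exact_mod_cast this
    exact Int.le_of_dvd hpos (Int.dvd_lcm_right x y)
  have hmul : (Int.lcm x y : Int) ≤ x * y := by
    have h1 : Int.lcm x y ∣ x.natAbs * y.natAbs := Nat.lcm_dvd_mul _ _
    have h2 : (Int.lcm x y : Int) ≤ (x.natAbs * y.natAbs : Nat) := by
      exact_mod_cast Nat.le_of_dvd (by positivity) h1
    have h3 : ((x.natAbs * y.natAbs : Nat) : Int) = x * y := by
      rw [Int.natCast_mul, Int.natAbs_of_nonneg hx.le, Int.natAbs_of_nonneg hy.le]
    omega
  unfold lcmA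
  have hfuel : ((x.natAbs * y.natAbs : Nat) : Int) = x * y := by
    rw [Int.natCast_mul, Int.natAbs_of_nonneg hx.le, Int.natAbs_of_nonneg hy.le]
  apply lcmA_go_eq x y hx hy _ _ (by split <;> omega) (by split <;> omega)
  split <;> omega

lemma lcmB_eq (x y : Int) (hx : 0 < x) (hy : 0 < y) :
    PySem.Int.floordiv (x * y) (Int.gcd x y) = (Int.lcm x y : Int) := by
  have hg : 0 < (Int.gcd x y : Int) := by
    have : 0 < Int.gcd x y := Int.gcd_pos_of_ne_zero_left y (by omega)
    exact_mod_cast this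
  rw [PySem.Int.floordiv_eq_ediv_of_pos hg]
  have hxy : x * y = (Int.gcd x y : Int) * (Int.lcm x y : Int) := by
    rw [← Int.natCast_mul, Int.gcd_mul_lcm, Int.natCast_mul,
      Int.natAbs_of_nonneg hx.le, Int.natAbs_of_nonneg hy.le]
  rw [hxy, Int.mul_ediv_cancel_left _ (by omega)]

lemma lcm_pos' (x y : Int) (hx : 0 < x) (hy : 0 < y) : 0 < (Int.lcm x y : Int) := by
  have := Nat.lcm_pos (m := x.natAbs) (n := y.natAbs) (by omega) (by omega)
  exact_mod_cast this

-- B's lcm fold: positivity and divisibility invariants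
lemma foldB_spec (g : Int → Int) :
    ∀ (l : List Int) (a : Int), 0 < a → (∀ i ∈ l, 0 < g i) →
      0 < l.foldl (fun ll i => PySem.Int.floordiv (ll * g i) (Int.gcd ll (g i))) a ∧
      a ∣ l.foldl (fun ll i => PySem.Int.floordiv (ll * g i) (Int.gcd ll (g i))) a ∧
      ∀ i ∈ l, g i ∣ l.foldl (fun ll i => PySem.Int.floordiv (ll * g i) (Int.gcd ll (g i))) a := by
  intro l
  induction l with
  | nil => intro a ha _; exact ⟨ha, dvd_refl a, by simp⟩
  | cons hd tl ih =>
    intro a ha hpos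
    have hhd : 0 < g hd := hpos hd (by simp)
    simp only [List.foldl_cons, lcmB_eq a (g hd) ha hhd]
    have hlcm : 0 < (Int.lcm a (g hd) : Int) := lcm_pos' a (g hd) ha hhd
    obtain ⟨h1, h2, h3⟩ := ih (Int.lcm a (g hd) : Int) hlcm (fun i hi => hpos i (List.mem_cons_of_mem _ hi))
    refine ⟨h1, dvd_trans (Int.dvd_lcm_left a (g hd)) h2, ?_⟩
    intro i hi
    rcases List.mem_cons.mp hi with rfl | hi
    · exact dvd_trans (Int.dvd_lcm_right a (g i)) h2
    · exact h3 i hi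

-- A's lcm fold equals B's lcm fold
lemma foldA_eq_foldB (g : Int → Int) :
    ∀ (l : List Int) (a : Int), 0 < a → (∀ i ∈ l, 0 < g i) →
      l.foldl (fun ll i => lcmA ll (g i)) a
        = l.foldl (fun ll i => PySem.Int.floordiv (ll * g i) (Int.gcd ll (g i))) a := by
  intro l
  induction l with
  | nil => intro a _ _; rfl
  | cons hd tl ih =>
    intro a ha hpos
    have hhd : 0 < g hd := hpos hd (by simp)
    simp only [List.foldl_cons, lcmB_eq a (g hd) ha hhd, lcmA_eq a (g hd) ha hhd]
    exact ih _ (lcm_pos' a (g hd) ha hhd) (fun i hi => hpos i (List.mem_cons_of_mem _ hi))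

-- insertion with comparators that agree on the inserted elements
lemma insertBy_congr {α : Type} (p q : α → α → Bool) (x : α) :
    ∀ (acc : List α), (∀ a ∈ acc, p x a = q x a) →
      PySem.List.insertBy p x acc = PySem.List.insertBy q x acc := by
  intro acc
  induction acc with
  | nil => intro _; rfl
  | cons hd tl ih =>
    intro h
    simp only [PySem.List.insertBy]
    rw [h hd (by simp)]
    by_cases hc : q x hd = true
    · simp [hc]
    · simp only [hc]
      rw [ih (fun a ha => h a (List.mem_cons_of_mem _ ha))]

lemma foldl_insertBy_congr {α : Type} (p q : α → α → Bool) :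
    ∀ (xs acc : List α),
      (∀ a b : α, (a ∈ xs ∨ a ∈ acc) → (b ∈ xs ∨ b ∈ acc) → p a b = q a b) →
      xs.foldl (fun acc x => PySem.List.insertBy p x acc) acc
        = xs.foldl (fun acc x => PySem.List.insertBy q x acc) acc := by
  intro xs
  induction xs with
  | nil => intro _ _; rfl
  | cons hd tl ih =>
    intro acc h
    simp only [List.foldl_cons]
    rw [insertBy_congr p q hd acc (fun a ha => h hd a (by simp) (Or.inr ha))]
    apply ih
    intro a b ha hb
    have hmem : ∀ c : α, c ∈ tl ∨ c ∈ PySem.List.insertBy q hd acc → c ∈ hd :: tl ∨ c ∈ acc := by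
      intro c hc
      rcases hc with hc | hc
      · exact Or.inl (List.mem_cons_of_mem _ hc)
      · rcases (PySem.List.mem_insertBy q hd c acc).mp hc with rfl | hc
        · exact Or.inl (by simp)
        · exact Or.inr hc
    exact h a b (hmem a ha) (hmem b hb)

-- the lexicographic comparison on events equals comparison of the linearised key
def evKey (K : Int) (p : Int × Int) : Int := p.1 * K + p.2

lemma lex_eq_key (K : Int) (p q : Int × Int)
    (hp : 0 ≤ p.2 ∧ p.2 < K) (hq : 0 ≤ q.2 ∧ q.2 < K) :
    (decide (p.1 < q.1) || (!decide (q.1 < p.1) && decide (p.2 < q.2)))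
      = decide (evKey K p < evKey K q) := by
  unfold evKey
  rcases lt_trichotomy p.1 q.1 with h | h | h
  · have : p.1 * K + p.2 < q.1 * K + q.2 := by nlinarith
    simp [h, this, not_lt.mpr h.le]
  · rw [h]
    by_cases h2 : p.2 < q.2 <;> simp [h2] <;> omega
  · have : q.1 * K + q.2 < p.1 * K + p.2 := by nlinarith
    have h3 : ¬ (p.1 * K + p.2 < q.1 * K + q.2) := by omega
    simp [not_lt.mpr h.le, h, h3]

-- sorted2 on events with bounded indices is sorted by the linearised key
lemma sorted2_eq_sorted_key (K : Int) (xs : List (Int × Int))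
    (h : ∀ p ∈ xs, 0 ≤ p.2 ∧ p.2 < K) :
    PySem.List.sorted2 xs (fun p => p.1) (fun p => p.2)
      = PySem.List.sorted xs (evKey K) := by
  rw [PySem.List.sorted_eq_foldl_insertBy]
  show xs.foldl _ [] = _
  apply foldl_insertBy_congr
  intro a b ha hb
  simp only [List.mem_nil_iff, or_false] at ha hb
  exact lex_eq_key K a b (h a ha) (h b hb)

-- ===== schedule combinatorics =====
def cnt (L : Int) (m : List Int) (i : Nat) : Nat := (L / m.getD i 0).toNat

def evF (L : Int) (m : List Int) (k : List Nat) (i : Nat) : List (Int × Int) :=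
  (List.range (cnt L m i - k.getD i 0)).map
    (fun t => (((k.getD i 0 + t : Nat) : Int) * m.getD i 0, (i : Int)))

def ev (L : Int) (m : List Int) (k : List Nat) (b' : Nat) : List (Int × Int) :=
  (List.range b').flatMap (evF L m k)

def occOf (m : List Int) (k : List Nat) (b' : Nat) : List Int :=
  (List.range b').map (fun i => ((k.getD i 0 : Nat) : Int) * m.getD i 0)

def rem (L : Int) (m : List Int) (k : List Nat) (b' : Nat) : Nat :=
  ∑ i ∈ Finset.range b', (cnt L m i - k.getD i 0)

def schedList (m : List Int) (b' : Nat) : Nat → List Nat → List (Int × Int)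
  | 0, _ => []
  | R+1, k =>
    let occ := occOf m k b'
    let mn := (PySem.List.min? occ (fun x => x)).getD 0
    let c := (PySem.List.index? occ mn).getD 0
    (mn, (c : Int)) :: schedList m b' R (k.set c (k.getD c 0 + 1))

lemma schedList_length (m : List Int) (b' : Nat) :
    ∀ (R : Nat) (k : List Nat), (schedList m b' R k).length = R := by
  intro R
  induction R with
  | zero => intro k; rfl
  | succ R ih => intro k; simp [schedList, ih]

lemma cnt_mul (L : Int) (m : List Int) (i : Nat)
    (hpos : 1 ≤ m.getD i 0) (hL : 0 < L) (hdvd : m.getD i 0 ∣ L) :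
    (cnt L m i : Int) * m.getD i 0 = L := by
  unfold cnt
  rw [Int.toNat_of_nonneg (Int.ediv_nonneg hL.le (by omega))]
  exact Int.ediv_mul_cancel hdvd

lemma cnt_pos (L : Int) (m : List Int) (i : Nat)
    (hpos : 1 ≤ m.getD i 0) (hL : 0 < L) (hdvd : m.getD i 0 ∣ L) :
    1 ≤ cnt L m i := by
  unfold cnt
  have h1 : m.getD i 0 ≤ L := Int.le_of_dvd hL hdvd
  have h2 : (1 : Int) ≤ L / m.getD i 0 := by
    rw [Int.le_ediv_iff_mul_le (by omega)]; omega
  omega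

lemma occOf_getD (m : List Int) (k : List Nat) (b' : Nat) (i : Nat) (hi : i < b') :
    (occOf m k b').getD i 0 = (k.getD i 0 : Int) * m.getD i 0 := by
  simp [occOf, List.getD_eq_getElem?_getD, hi]

lemma occOf_length (m : List Int) (k : List Nat) (b' : Nat) :
    (occOf m k b').length = b' := by simp [occOf]

lemma occOf_getElem (m : List Int) (k : List Nat) (b' : Nat) (i : Nat)
    (hi : i < (occOf m k b').length) :
    (occOf m k b')[i] = (k.getD i 0 : Int) * m.getD i 0 := by
  simp [occOf]

lemma mem_ev_iff (L : Int) (m : List Int) (k : List Nat) (b' : Nat) (x : Int × Int) :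
    x ∈ ev L m k b' ↔ ∃ i : Nat, i < b' ∧ ∃ j : Nat, k.getD i 0 ≤ j ∧ j < cnt L m i ∧
      x = ((j : Int) * m.getD i 0, (i : Int)) := by
  unfold ev evF
  simp only [List.mem_flatMap, List.mem_map, List.mem_range]
  constructor
  · rintro ⟨i, hi, t, ht, rfl⟩
    exact ⟨i, hi, k.getD i 0 + t, by omega, by omega, by push_cast; ring_nf⟩
  · rintro ⟨i, hi, j, hj1, hj2, rfl⟩
    refine ⟨i, hi, j - k.getD i 0, by omega, ?_⟩
    have : k.getD i 0 + (j - k.getD i 0) = j := by omega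
    rw [this]

-- facts about the first-minimum selection on a live state
lemma step_facts (L : Int) (m : List Int) (k : List Nat) (b' : Nat)
    (hpos : ∀ i < b', 1 ≤ m.getD i 0) (hL : 0 < L)
    (hdvd : ∀ i < b', m.getD i 0 ∣ L)
    (hk : ∀ i < b', k.getD i 0 ≤ cnt L m i)
    (hrem : 0 < rem L m k b') :
    ∃ (mn0 : Int) (c : Nat),
      PySem.List.min? (occOf m k b') (fun x => x) = some mn0 ∧
      PySem.List.index? (occOf m k b') mn0 = some c ∧
      c < b' ∧ k.getD c 0 < cnt L m c ∧
      mn0 = (k.getD c 0 : Int) * m.getD c 0 ∧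
      (∀ i < b', mn0 ≤ (k.getD i 0 : Int) * m.getD i 0) ∧
      (∀ j < c, (k.getD j 0 : Int) * m.getD j 0 ≠ mn0) := by
  have hb' : 0 < b' := by
    by_contra h
    unfold rem at hrem
    simp [show b' = 0 by omega] at hrem
  have hne : occOf m k b' ≠ [] := by
    intro h
    have := occOf_length m k b'
    rw [h] at this; simp at this; omega
  obtain ⟨mn0, hmin⟩ : ∃ mn0, PySem.List.min? (occOf m k b') (fun x => x) = some mn0 := by
    cases h : PySem.List.min? (occOf m k b') (fun x => x) with
    | none => exact absurd ((PySem.List.min?_eq_none_iff _ _).mp h) hne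
    | some v => exact ⟨v, rfl⟩
  have hmem := PySem.List.min?_mem hmin
  have hismin := PySem.List.min?_isMin hmin
  obtain ⟨c, hidx⟩ : ∃ c, PySem.List.index? (occOf m k b') mn0 = some c := by
    cases h : PySem.List.index? (occOf m k b') mn0 with
    | none => exact absurd ((PySem.List.index?_eq_none_iff _ _).mp h) (by simp [hmem])
    | some v => exact ⟨v, rfl⟩
  obtain ⟨hc, hocc_c, hfirst⟩ := PySem.List.getElem_of_index?_eq_some hidx
  rw [occOf_length] at hc
  -- some bucket is strictly below L
  obtain ⟨i0, hi0, hki0⟩ : ∃ i0, i0 < b' ∧ k.getD i0 0 < cnt L m i0 := by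
    by_contra h
    push_neg at h
    have : rem L m k b' = 0 := by
      unfold rem
      apply Finset.sum_eq_zero
      intro i hi
      have := h i (Finset.mem_range.mp hi)
      have := hk i (Finset.mem_range.mp hi)
      omega
    omega
  have hmn_lt : mn0 < L := by
    have h1 : mn0 ≤ (k.getD i0 0 : Int) * m.getD i0 0 := by
      have : (k.getD i0 0 : Int) * m.getD i0 0 ∈ occOf m k b' := by
        rw [← occOf_getElem m k b' i0 (by rw [occOf_length]; exact hi0)]
        exact List.getElem_mem _
      exact hismin _ this
    have h2 : (k.getD i0 0 : Int) * m.getD i0 0 < L := by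
      have hc0 := cnt_mul L m i0 (hpos i0 hi0) hL (hdvd i0 hi0)
      have hm := hpos i0 hi0
      have : (k.getD i0 0 : Int) * m.getD i0 0 < (cnt L m i0 : Int) * m.getD i0 0 := by
        apply mul_lt_mul_of_pos_right _ (by omega)
        exact_mod_cast hki0
      omega
    omega
  have hocc_c' : mn0 = (k.getD c 0 : Int) * m.getD c 0 := by
    rw [← hocc_c, occOf_getElem]
  have hkc : k.getD c 0 < cnt L m c := by
    rcases lt_or_eq_of_le (hk c hc) with h | h
    · exact h
    · exfalso
      have := cnt_mul L m c (hpos c hc) hL (hdvd c hc)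
      rw [hocc_c', h] at hmn_lt
      omega
  refine ⟨mn0, c, hmin, hidx, hc, hkc, hocc_c', ?_, ?_⟩
  · intro i hi
    apply hismin
    rw [← occOf_getElem m k b' i (by rw [occOf_length]; exact hi)]
    exact List.getElem_mem _
  · intro j hj
    have := hfirst j (by omega)
    rw [occOf_getElem m k b' j (by rw [occOf_length]; omega)] at this
    exact this

lemma getD_set_ne {k : List Nat} {c i : Nat} (h : i ≠ c) (v : Nat) :
    (k.set c v).getD i 0 = k.getD i 0 := by
  simp [List.getD_eq_getElem?_getD, List.getElem?_set_ne (Ne.symm h)]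

lemma getD_set_self {k : List Nat} {c : Nat} (h : c < k.length) (v : Nat) :
    (k.set c v).getD c 0 = v := by
  simp [List.getD_eq_getElem?_getD, List.getElem?_set_self, h]

-- removing the served event: ev k = P ++ e :: T and ev k' = P ++ T
lemma flatMap_congr' {α β : Type} (f g : α → List β) (l : List α)
    (h : ∀ i ∈ l, f i = g i) : l.flatMap f = l.flatMap g := by
  induction l with
  | nil => rfl
  | cons hd tl ih =>
    simp only [List.flatMap_cons, h hd (by simp)]
    rw [ih (fun i hi => h i (List.mem_cons_of_mem _ hi))]

lemma ev_decomp (L : Int) (m : List Int) (k : List Nat) (b' : Nat) (c : Nat)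
    (hc : c < b') (hkc : k.getD c 0 < cnt L m c) (hlen : k.length = b') :
    ∃ P T, ev L m k b' = P ++ ((k.getD c 0 : Int) * m.getD c 0, (c : Int)) :: T ∧
      ev L m (k.set c (k.getD c 0 + 1)) b' = P ++ T := by
  have hsplit : List.range b'
      = (List.range c ++ [c]) ++ List.map (fun t => (c+1)+t) (List.range (b' - (c+1))) := by
    conv_lhs => rw [show b' = (c+1) + (b' - (c+1)) by omega]
    rw [List.range_add, List.range_succ]
  set k' := k.set c (k.getD c 0 + 1) with hk'
  have hFne : ∀ i, i ≠ c → evF L m k' i = evF L m k i := by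
    intro i hi
    unfold evF
    rw [getD_set_ne hi]
  have hFc : evF L m k c = ((k.getD c 0 : Int) * m.getD c 0, (c : Int)) :: evF L m k' c := by
    unfold evF
    rw [getD_set_self (by omega)]
    have h2 : cnt L m c - k.getD c 0 = (cnt L m c - (k.getD c 0 + 1)) + 1 := by omega
    rw [h2, List.range_succ_eq_map, List.map_cons, List.map_map]
    refine congrArg₂ List.cons (by simp) ?_
    apply List.map_congr_left; intro t _
    simp only [Function.comp_apply, Nat.succ_eq_add_one]
    have h3 : (k.getD c 0 + (t + 1) : Nat) = (k.getD c 0 + 1) + t := by omega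
    rw [h3]
  have hPeq : (List.range c).flatMap (evF L m k') = (List.range c).flatMap (evF L m k) := by
    apply flatMap_congr'
    intro i hi
    exact hFne i (by simp at hi; omega)
  have hTeq : (List.map (fun t => (c+1)+t) (List.range (b' - (c+1)))).flatMap (evF L m k')
      = (List.map (fun t => (c+1)+t) (List.range (b' - (c+1)))).flatMap (evF L m k) := by
    apply flatMap_congr'
    intro i hi
    simp only [List.mem_map, List.mem_range] at hi
    obtain ⟨t, _, rfl⟩ := hi
    exact hFne _ (by omega)
  refine ⟨(List.range c).flatMap (evF L m k), evF L m k' c ++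
    (List.map (fun t => (c+1)+t) (List.range (b' - (c+1)))).flatMap (evF L m k), ?_, ?_⟩
  · rw [ev, hsplit]
    simp only [List.flatMap_append, List.flatMap_singleton, hFc]
    simp
  · rw [ev, hsplit]
    simp only [List.flatMap_append, List.flatMap_singleton, hPeq, hTeq]
    simp

-- the served event is strictly lex-smallest among the remaining events
lemma min_strict (L : Int) (m : List Int) (k : List Nat) (b' : Nat) (c : Nat) (mn0 : Int)
    (hpos : ∀ i < b', 1 ≤ m.getD i 0)
    (hc : c < b') (hlen : k.length = b')
    (hocc : mn0 = (k.getD c 0 : Int) * m.getD c 0)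
    (hmin : ∀ i < b', mn0 ≤ (k.getD i 0 : Int) * m.getD i 0)
    (hfirst : ∀ j < c, (k.getD j 0 : Int) * m.getD j 0 ≠ mn0) :
    ∀ x ∈ ev L m (k.set c (k.getD c 0 + 1)) b',
      evKey (b' : Int) (mn0, (c : Int)) < evKey (b' : Int) x := by
  intro x hx
  rw [mem_ev_iff] at hx
  obtain ⟨i, hi, j, hj1, hj2, rfl⟩ := hx
  unfold evKey
  simp only
  have hKc : (c : Int) < (b' : Int) := by exact_mod_cast hc
  have hKi : (0 : Int) ≤ (i : Int) ∧ (i : Int) < (b' : Int) := by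
    constructor
    · positivity
    · exact_mod_cast hi
  by_cases hic : i = c
  · subst hic
    rw [getD_set_self (by omega)] at hj1
    have hmi := hpos i hi
    have : mn0 < (j : Int) * m.getD i 0 := by
      rw [hocc]
      have : (k.getD i 0 : Int) < (j : Int) := by exact_mod_cast hj1
      nlinarith
    nlinarith
  · rw [getD_set_ne hic] at hj1
    have hmi := hpos i hi
    have hge : mn0 ≤ (j : Int) * m.getD i 0 := by
      have h1 := hmin i hi
      have h2 : (k.getD i 0 : Int) ≤ (j : Int) := by exact_mod_cast hj1
      nlinarith
    rcases lt_or_eq_of_le hge with h | h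
    · nlinarith
    · -- equal first components: then j = k i and i must come after c
      have hkj : (j : Int) * m.getD i 0 = (k.getD i 0 : Int) * m.getD i 0 := by
        have h1 := hmin i hi
        have h2 : (k.getD i 0 : Int) ≤ (j : Int) := by exact_mod_cast hj1
        nlinarith
      have hne : c < i := by
        rcases lt_trichotomy i c with hlt | heq | hgt
        · exact absurd (by omega : (k.getD i 0 : Int) * m.getD i 0 = mn0) (hfirst i hlt)
        · exact absurd heq hic
        · exact hgt
      have : (c : Int) < (i : Int) := by exact_mod_cast hne
      rw [← h]
      omega

lemma rem_set (L : Int) (m : List Int) (k : List Nat) (b' : Nat) (c : Nat)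
    (hc : c < b') (hkc : k.getD c 0 < cnt L m c) (hlen : k.length = b') :
    rem L m k b' = rem L m (k.set c (k.getD c 0 + 1)) b' + 1 := by
  unfold rem
  rw [← Finset.add_sum_erase _ _ (Finset.mem_range.mpr hc),
    ← Finset.add_sum_erase _ _ (Finset.mem_range.mpr hc)]
  rw [getD_set_self (by omega)]
  have : ∑ i ∈ (Finset.range b').erase c, (cnt L m i - (k.set c (k.getD c 0 + 1)).getD i 0)
      = ∑ i ∈ (Finset.range b').erase c, (cnt L m i - k.getD i 0) := by
    apply Finset.sum_congr rfl
    intro i hi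
    rw [getD_set_ne (Finset.ne_of_mem_erase hi)]
  rw [this]
  omega

lemma rem_zero_iff (L : Int) (m : List Int) (k : List Nat) (b' : Nat) :
    rem L m k b' = 0 ↔ ∀ i < b', cnt L m i - k.getD i 0 = 0 := by
  unfold rem
  rw [Finset.sum_eq_zero_iff]
  constructor
  · intro h i hi; exact h i (Finset.mem_range.mpr hi)
  · intro h i hi; exact h i (Finset.mem_range.mp hi)

lemma ev_nil (L : Int) (m : List Int) (k : List Nat) (b' : Nat)
    (h : rem L m k b' = 0) : ev L m k b' = [] := by
  rw [rem_zero_iff] at h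
  unfold ev
  rw [List.flatMap_eq_nil_iff]
  intro i hi
  unfold evF
  rw [h i (List.mem_range.mp hi)]
  rfl

-- every scheduled event is a remaining event
lemma mem_schedList (L : Int) (m : List Int) (b' : Nat)
    (hpos : ∀ i < b', 1 ≤ m.getD i 0) (hL : 0 < L)
    (hdvd : ∀ i < b', m.getD i 0 ∣ L) :
    ∀ (R : Nat) (k : List Nat), k.length = b' → (∀ i < b', k.getD i 0 ≤ cnt L m i) →
      R = rem L m k b' →
      ∀ x ∈ schedList m b' R k, x ∈ ev L m k b' := by
  intro R
  induction R with
  | zero => intro k _ _ _ x hx; simp [schedList] at hx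
  | succ R ih =>
    intro k hlen hk hR x hx
    obtain ⟨mn0, c, hmin, hidx, hc, hkc, hocc, hismin, hfirst⟩ :=
      step_facts L m k b' hpos hL hdvd hk (by omega)
    simp only [schedList, hmin, hidx, Option.getD_some] at hx
    have hk' : ∀ i < b', (k.set c (k.getD c 0 + 1)).getD i 0 ≤ cnt L m i := by
      intro i hi
      by_cases hic : i = c
      · subst hic; rw [getD_set_self (by omega)]; omega
      · rw [getD_set_ne hic]; exact hk i hi
    have hR' : R = rem L m (k.set c (k.getD c 0 + 1)) b' := by
      have := rem_set L m k b' c hc hkc hlen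
      omega
    rcases List.mem_cons.mp hx with rfl | hx
    · rw [mem_ev_iff]
      exact ⟨c, hc, k.getD c 0, le_refl _, hkc, by rw [hocc]⟩
    · have hx' := ih (k.set c (k.getD c 0 + 1)) (by simp [hlen]) hk' hR' x hx
      -- ev k' ⊆ ev k
      rw [mem_ev_iff] at hx' ⊢
      obtain ⟨i, hi, j, hj1, hj2, rfl⟩ := hx'
      refine ⟨i, hi, j, ?_, hj2, rfl⟩
      by_cases hic : i = c
      · subst hic; rw [getD_set_self (by omega)] at hj1; omega
      · rw [getD_set_ne hic] at hj1; exact hj1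

-- the schedule is strictly increasing in the linearised key
lemma schedList_pairwise (L : Int) (m : List Int) (b' : Nat)
    (hpos : ∀ i < b', 1 ≤ m.getD i 0) (hL : 0 < L)
    (hdvd : ∀ i < b', m.getD i 0 ∣ L) :
    ∀ (R : Nat) (k : List Nat), k.length = b' → (∀ i < b', k.getD i 0 ≤ cnt L m i) →
      R = rem L m k b' →
      List.Pairwise (fun a b => evKey (b' : Int) a < evKey (b' : Int) b) (schedList m b' R k) := by
  intro R
  induction R with
  | zero => intro k _ _ _; simp [schedList]
  | succ R ih =>
    intro k hlen hk hR
    obtain ⟨mn0, c, hmin, hidx, hc, hkc, hocc, hismin, hfirst⟩ :=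
      step_facts L m k b' hpos hL hdvd hk (by omega)
    simp only [schedList, hmin, hidx, Option.getD_some]
    have hk' : ∀ i < b', (k.set c (k.getD c 0 + 1)).getD i 0 ≤ cnt L m i := by
      intro i hi
      by_cases hic : i = c
      · subst hic; rw [getD_set_self (by omega)]; omega
      · rw [getD_set_ne hic]; exact hk i hi
    have hR' : R = rem L m (k.set c (k.getD c 0 + 1)) b' := by
      have := rem_set L m k b' c hc hkc hlen
      omega
    constructor
    · intro x hx
      have hxev := mem_schedList L m b' hpos hL hdvd R (k.set c (k.getD c 0 + 1))
        (by simp [hlen]) hk' hR' x hx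
      exact min_strict L m k b' c mn0 hpos hc hlen hocc hismin hfirst x hxev
    · exact ih (k.set c (k.getD c 0 + 1)) (by simp [hlen]) hk' hR'

-- the greedy schedule is the events sorted by the linearised key
lemma sorted_ev (L : Int) (m : List Int) (b' : Nat)
    (hpos : ∀ i < b', 1 ≤ m.getD i 0) (hL : 0 < L)
    (hdvd : ∀ i < b', m.getD i 0 ∣ L) :
    ∀ (R : Nat) (k : List Nat), k.length = b' → (∀ i < b', k.getD i 0 ≤ cnt L m i) →
      R = rem L m k b' →
      PySem.List.sorted (ev L m k b') (evKey (b' : Int)) = schedList m b' R k := by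
  intro R
  induction R with
  | zero =>
    intro k _ _ hR
    rw [ev_nil L m k b' hR.symm]
    rfl
  | succ R ih =>
    intro k hlen hk hR
    obtain ⟨mn0, c, hmin, hidx, hc, hkc, hocc, hismin, hfirst⟩ :=
      step_facts L m k b' hpos hL hdvd hk (by omega)
    simp only [schedList, hmin, hidx, Option.getD_some]
    have hk' : ∀ i < b', (k.set c (k.getD c 0 + 1)).getD i 0 ≤ cnt L m i := by
      intro i hi
      by_cases hic : i = c
      · subst hic; rw [getD_set_self (by omega)]; omega
      · rw [getD_set_ne hic]; exact hk i hi
    have hR' : R = rem L m (k.set c (k.getD c 0 + 1)) b' := by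
      have := rem_set L m k b' c hc hkc hlen
      omega
    have hihs := ih (k.set c (k.getD c 0 + 1)) (by simp [hlen]) hk' hR'
    apply PySem.List.sorted_eq_of_perm_of_pairwise_lt
    · -- permutation
      obtain ⟨P, T, hPT, hPT'⟩ := ev_decomp L m k b' c hc hkc hlen
      have p1 : ((mn0, (c : Int)) :: schedList m b' R (k.set c (k.getD c 0 + 1))).Perm
          ((mn0, (c : Int)) :: (P ++ T)) := by
        apply List.Perm.cons
        rw [← hihs, ← hPT']
        exact PySem.List.sorted_perm _ _ _
      have p2 : ((mn0, (c : Int)) :: (P ++ T)).Perm (P ++ (mn0, (c : Int)) :: T) :=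
        List.perm_middle.symm
      have hev : ev L m k b' = P ++ (mn0, (c : Int)) :: T := by rw [hPT, hocc]
      rw [hev]
      exact p1.trans p2
    · -- strict pairwise
      constructor
      · intro x hx
        rw [← hihs] at hx
        have hxev := (PySem.List.sorted_perm _ _ _).mem_iff.mp hx
        exact min_strict L m k b' c mn0 hpos hc hlen hocc hismin hfirst x hxev
      · exact schedList_pairwise L m b' hpos hL hdvd R (k.set c (k.getD c 0 + 1))
          (by simp [hlen]) hk' hR'

lemma occ_set (m : List Int) (k : List Nat) (b' : Nat) (c : Nat) (hc : c < b')
    (hlen : k.length = b') :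
    (occOf m k b').set c ((occOf m k b').getD c 0 + m.getD c 0)
      = occOf m (k.set c (k.getD c 0 + 1)) b' := by
  apply List.ext_getElem
  · simp [occOf]
  · intro i hi1 hi2
    rw [occOf_getElem]
    by_cases hic : i = c
    · subst hic
      rw [List.getElem_set_self, getD_set_self (by omega), occOf_getD m k b' i
        (by rw [occOf_length] at hi2; exact hi2)]
      push_cast; ring
    · rw [List.getElem_set_ne (by omega), getD_set_ne hic,
        occOf_getElem m k b' i (by rw [occOf_length]; rw [List.length_set, occOf_length] at hi1; exact hi1)]

lemma foldl_flag (f : Int → Int) (LL : Int) (l : List Int) :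
    ∀ init : Bool,
      l.foldl (fun fl i => if f i ≠ LL then false else fl) init
        = (init && l.all (fun i => f i == LL)) := by
  induction l with
  | nil => intro init; simp
  | cons hd tl ih =>
    intro init
    simp only [List.foldl_cons, List.all_cons]
    rw [ih]
    by_cases h : f hd = LL <;> simp [h]

lemma alldone_iff (L : Int) (m : List Int) (k : List Nat) (b' : Nat)
    (hpos : ∀ i < b', 1 ≤ m.getD i 0) (hL : 0 < L)
    (hdvd : ∀ i < b', m.getD i 0 ∣ L)
    (hk : ∀ i < b', k.getD i 0 ≤ cnt L m i) :
    (∀ i < b', (occOf m k b').getD i 0 = L) ↔ rem L m k b' = 0 := by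
  rw [rem_zero_iff]
  constructor
  · intro h i hi
    have h1 := h i hi
    rw [occOf_getD m k b' i hi] at h1
    have h2 := cnt_mul L m i (hpos i hi) hL (hdvd i hi)
    have h3 : (k.getD i 0 : Int) = (cnt L m i : Int) := by
      have hm := hpos i hi
      have := mul_right_cancel₀ (b := m.getD i 0) (by omega) (h1.trans h2.symm)
      exact this
    have : k.getD i 0 = cnt L m i := by exact_mod_cast h3
    omega
  · intro h i hi
    rw [occOf_getD m k b' i hi]
    have h1 := h i hi
    have hki : k.getD i 0 = cnt L m i := by have := hk i hi; omega
    rw [hki]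
    exact cnt_mul L m i (hpos i hi) hL (hdvd i hi)

lemma flag_eq (L : Int) (m : List Int) (b : Int) (b' : Nat) (hb : b.toNat = b')
    (hb0 : 0 ≤ b) (k : List Nat)
    (hpos : ∀ i < b', 1 ≤ m.getD i 0) (hL : 0 < L)
    (hdvd : ∀ i < b', m.getD i 0 ∣ L)
    (hk : ∀ i < b', k.getD i 0 ≤ cnt L m i) :
    ((PySem.List.pyRange 0 b 1).foldl
        (fun fl i => if PySem.List.pyGetD (occOf m k b') i 0 ≠ L then false else fl) true)
      = decide (rem L m k b' = 0) := by
  rw [foldl_flag]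
  rw [Bool.true_and]
  rcases h : decide (rem L m k b' = 0) with _ | _
  · rw [decide_eq_false_iff_not] at h
    rw [List.all_eq_false]
    have h2 : ¬ (∀ i < b', (occOf m k b').getD i 0 = L) := by
      rw [alldone_iff L m k b' hpos hL hdvd hk]; exact h
    push_neg at h2
    obtain ⟨i, hi, hne⟩ := h2
    refine ⟨(i : Int), ?_, ?_⟩
    · rw [PySem.List.mem_pyRange_one]
      constructor
      · positivity
      · omega
    · simp only [beq_iff_eq]
      rw [PySem.List.pyGetD_of_nonneg _ _ (by positivity), Int.toNat_natCast]
      exact hne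
  · rw [decide_eq_true_eq] at h
    rw [List.all_eq_true]
    intro i hi
    rw [PySem.List.mem_pyRange_one] at hi
    simp only [beq_iff_eq]
    rw [PySem.List.pyGetD_of_nonneg _ _ hi.1]
    rw [(alldone_iff L m k b' hpos hL hdvd hk).mpr h i.toNat (by omega)]
lemma simLoop_eq (L : Int) (m : List Int) (b : Int) (b' : Nat)
    (hb : b.toNat = b') (hb0 : 0 ≤ b)
    (hpos : ∀ i < b', 1 ≤ m.getD i 0) (hL : 0 < L)
    (hdvd : ∀ i < b', m.getD i 0 ∣ L) :
    ∀ (fuel : Nat) (k : List Nat) (assign : List Int),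
      k.length = b' → (∀ i < b', k.getD i 0 ≤ cnt L m i) →
      1 ≤ rem L m k b' → rem L m k b' ≤ fuel →
      simLoop m b L fuel (occOf m k b') assign
        = assign ++ (schedList m b' (rem L m k b') k).map Prod.snd := by
  intro fuel
  induction fuel with
  | zero => intro k assign _ _ h1 h2; omega
  | succ f ih =>
    intro k assign hlen hk h1 h2
    obtain ⟨mn0, c, hmin, hidx, hc, hkc, hocc, hismin, hfirst⟩ :=
      step_facts L m k b' hpos hL hdvd hk (by omega)
    have hk' : ∀ i < b', (k.set c (k.getD c 0 + 1)).getD i 0 ≤ cnt L m i := by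
      intro i hi
      by_cases hic : i = c
      · subst hic; rw [getD_set_self (by omega)]; omega
      · rw [getD_set_ne hic]; exact hk i hi
    have hlen' : (k.set c (k.getD c 0 + 1)).length = b' := by simp [hlen]
    have hrs := rem_set L m k b' c hc hkc hlen
    simp only [simLoop, hmin, hidx, Option.getD_some]
    rw [PySem.List.pyGetD_natCast, occ_set m k b' c hc hlen,
      flag_eq L m b b' hb hb0 _ hpos hL hdvd hk']
    by_cases hr : rem L m (k.set c (k.getD c 0 + 1)) b' = 0
    · rw [if_pos (decide_eq_true hr)]
      have h3 : rem L m k b' = 1 := by omega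
      rw [h3]
      simp only [schedList, hmin, hidx, Option.getD_some]
      simp
    · rw [if_neg (fun h => hr (of_decide_eq_true h))]
      rw [ih _ (assign ++ [(c : Int)]) hlen' hk' (by omega) (by omega)]
      have h3 : rem L m k b' = rem L m (k.set c (k.getD c 0 + 1)) b' + 1 := hrs
      rw [h3]
      simp only [schedList, hmin, hidx, Option.getD_some, List.map_cons]
      simp

lemma getD_replicate_zero (b' i : Nat) : (List.replicate b' (0 : Nat)).getD i 0 = 0 := by
  rcases lt_or_ge i b' with h | h
  · simp [List.getD_eq_getElem?_getD, h]
  · simp [List.getD_eq_getElem?_getD, show ¬ i < b' by omega]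

lemma main_eq (n b : Int) (m : List Int)
    (hb1 : 1 ≤ b) (hblen : b ≤ (m.length : Int))
    (hpre : ∀ x ∈ m.take b.toNat, 1 ≤ x) :
    main_job n b m = main_job_alt n b m := by
  set b' : Nat := b.toNat with hb'
  have hb'1 : 1 ≤ b' := by omega
  have hb'len : b' ≤ m.length := by omega
  -- positivity of the first b' periods
  have hposN : ∀ i < b', 1 ≤ m.getD i 0 := by
    intro i hi
    have hil : i < m.length := by omega
    have h1 : m.getD i 0 = m[i] := List.getD_eq_getElem m 0 hil
    rw [h1]
    apply hpre
    have h2 : m[i] = (m.take b')[i]'(by simp; omega) := by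
      rw [List.getElem_take]
    rw [h2]
    exact List.getElem_mem _
  -- the two lcm folds
  set g : Int → Int := fun i => PySem.List.pyGetD m (i+1) 0 with hg
  have hg_pos : ∀ i ∈ PySem.List.pyRange 0 (b-1) 1, 0 < g i := by
    intro i hi
    rw [PySem.List.mem_pyRange_one] at hi
    rw [hg]
    simp only
    rw [PySem.List.pyGetD_of_nonneg _ _ (by omega)]
    have := hposN (i+1).toNat (by omega)
    omega
  have ha_pos : 0 < PySem.List.pyGetD m 0 0 := by
    rw [show (0:Int) = ((0:Nat):Int) by rfl, PySem.List.pyGetD_natCast]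
    exact hposN 0 (by omega)
  set L : Int := (PySem.List.pyRange 0 (b-1) 1).foldl
      (fun ll i => PySem.Int.floordiv (ll * g i) (Int.gcd ll (g i))) (PySem.List.pyGetD m 0 0)
    with hLdef
  obtain ⟨hL, hdvd0, hdvdg⟩ := foldB_spec g (PySem.List.pyRange 0 (b-1) 1)
    (PySem.List.pyGetD m 0 0) ha_pos hg_pos
  have hAfold : (PySem.List.pyRange 0 (b-1) 1).foldl
      (fun ll i => lcmA ll (PySem.List.pyGetD m (i+1) 0)) (PySem.List.pyGetD m 0 0) = L := by
    rw [hLdef]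
    exact foldA_eq_foldB g _ _ ha_pos hg_pos
  have hdvdN : ∀ i < b', m.getD i 0 ∣ L := by
    intro i hi
    cases i with
    | zero =>
      have : PySem.List.pyGetD m 0 0 = m.getD 0 0 := by
        rw [show (0:Int) = ((0:Nat):Int) by rfl, PySem.List.pyGetD_natCast]
      rw [← this]; exact hdvd0
    | succ j =>
      have hmem : ((j:Nat) : Int) ∈ PySem.List.pyRange 0 (b-1) 1 := by
        rw [PySem.List.mem_pyRange_one]
        constructor
        · positivity
        · omega
      have := hdvdg _ hmem
      rw [hg] at this
      simp only at this
      rw [show ((j:Nat):Int) + 1 = (((j+1:Nat)):Int) by push_cast; ring,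
        PySem.List.pyGetD_natCast] at this
      exact this
  -- initial counters
  set k0 : List Nat := List.replicate b' 0 with hk0
  have hk0len : k0.length = b' := by simp [hk0]
  have hk0getD : ∀ i, k0.getD i 0 = 0 := fun i => getD_replicate_zero b' i
  have hk0le : ∀ i < b', k0.getD i 0 ≤ cnt L m i := by intro i _; rw [hk0getD]; omega
  have hocc0 : List.replicate b' (0:Int) = occOf m k0 b' := by
    apply List.ext_getElem
    · simp [occOf]
    · intro i h1 h2
      rw [occOf_getElem, hk0getD]
      simp
  have hrem0 : rem L m k0 b' = ∑ i ∈ Finset.range b', cnt L m i := by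
    unfold rem
    exact Finset.sum_congr rfl (fun i _ => by rw [hk0getD]; omega)
  have hrem1 : 1 ≤ rem L m k0 b' := by
    rw [hrem0]
    calc 1 ≤ cnt L m 0 := cnt_pos L m 0 (hposN 0 (by omega)) hL (hdvdN 0 (by omega))
      _ ≤ ∑ i ∈ Finset.range b', cnt L m i :=
        Finset.single_le_sum (fun i _ => Nat.zero_le _) (Finset.mem_range.mpr (by omega))
  have hremfuel : rem L m k0 b' ≤ L.natAbs * b.toNat + 1 := by
    rw [hrem0]
    have hcnt_le : ∀ i ∈ Finset.range b', cnt L m i ≤ L.toNat := by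
      intro i hi
      have hii := Finset.mem_range.mp hi
      unfold cnt
      have h1 : L / m.getD i 0 ≤ L := Int.ediv_le_self _ hL.le
      omega
    calc ∑ i ∈ Finset.range b', cnt L m i ≤ (Finset.range b').card • L.toNat :=
        Finset.sum_le_card_nsmul _ _ _ hcnt_le
      _ = b' * L.toNat := by simp [Finset.card_range]
      _ ≤ L.natAbs * b.toNat + 1 := by
          rw [Nat.mul_comm, show L.toNat = L.natAbs by omega, hb']
          omega
  -- the simulated assignment list is the sorted event schedule
  have hsim : simLoop m b L (L.natAbs * b.toNat + 1) (occOf m k0 b') []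
      = (schedList m b' (rem L m k0 b') k0).map Prod.snd := by
    rw [simLoop_eq L m b b' rfl (by omega) hposN hL hdvdN _ k0 [] hk0len hk0le hrem1 hremfuel]
    rfl
  have hsorted := sorted_ev L m b' hposN hL hdvdN (rem L m k0 b') k0 hk0len hk0le rfl
  -- B's event list is ev L m k0 b'
  have hev0 : (PySem.List.pyRange 0 b 1).flatMap
      (fun i => (PySem.List.pyRange 0 (PySem.Int.floordiv L (PySem.List.pyGetD m i 0)) 1).map
        (fun j => (j * PySem.List.pyGetD m i 0, i))) = ev L m k0 b' := by
    rw [PySem.List.pyRange_one 0 b, List.flatMap_map]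
    unfold ev
    rw [show (b - 0).toNat = b' by omega]
    apply flatMap_congr'
    intro i hi
    have hib : i < b' := List.mem_range.mp hi
    simp only [zero_add, PySem.List.pyGetD_natCast]
    have hfd : PySem.Int.floordiv L (m.getD i 0) = ((cnt L m i : Nat) : Int) := by
      rw [PySem.Int.floordiv_eq_ediv_of_pos (by have := hposN i hib; omega)]
      unfold cnt
      rw [Int.toNat_of_nonneg (Int.ediv_nonneg hL.le (by have := hposN i hib; omega))]
    rw [hfd, PySem.List.pyRange_one 0 _, List.map_map]
    unfold evF
    rw [show (((cnt L m i : Nat) : Int) - 0).toNat = cnt L m i - k0.getD i 0 by rw [hk0getD]; omega]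
    apply List.map_congr_left
    intro t _
    simp only [Function.comp_apply, zero_add]
    rw [hk0getD]
    simp
  -- B's sort is the linear-key sort
  have hbound : ∀ p ∈ ev L m k0 b', 0 ≤ p.2 ∧ p.2 < (b' : Int) := by
    intro p hp
    rw [mem_ev_iff] at hp
    obtain ⟨i, hi, j, _, _, rfl⟩ := hp
    constructor
    · positivity
    · show (i : Int) < (b' : Int)
      exact_mod_cast hi
  -- assemble
  show (let occupied : List Int := PySem.List.pyRepeat [0] b
    let ll0 := PySem.List.pyGetD m 0 0
    let ll := (PySem.List.pyRange 0 (b-1) 1).foldl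
        (fun ll i => lcmA ll (PySem.List.pyGetD m (i+1) 0)) ll0
    let assign := simLoop m b ll (ll.natAbs * b.toNat + 1) occupied []
    let idx := PySem.Int.mod (n-1) assign.length
    PySem.List.pyGetD assign idx 0 + 1) = _
  simp only [main_job_alt]
  rw [PySem.List.pyRepeat_singleton, hAfold]
  have hocc0' : List.replicate b.toNat (0:Int) = occOf m k0 b' := hocc0
  rw [hocc0', hsim]
  rw [hev0, sorted2_eq_sorted_key (b' : Int) _ hbound, hsorted]
  rw [List.length_map, schedList_length]
  congr 1
  rw [show ((0:Int)) = Prod.snd ((0:Int), (0:Int)) from rfl]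
  rw [PySem.List.pyGetD_map Prod.snd]

-- the degenerate single-bucket case: both programs return 1 for any nonzero period
lemma floordiv_self (a : Int) (h : a ≠ 0) : PySem.Int.floordiv a a = 1 := by
  have h1 := PySem.Int.floordiv_mul_add_mod a a
  have h2 : PySem.Int.mod a a = 0 := (PySem.Int.mod_eq_zero_iff_dvd a a).mpr dvd_rfl
  have h3 : PySem.Int.floordiv a a * a = 1 * a := by omega
  exact mul_right_cancel₀ h h3

lemma mod_one_self (x : Int) : PySem.Int.mod x 1 = 0 := by
  have h1 := PySem.Int.mod_nonneg x (b := 1) one_pos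
  have h2 := PySem.Int.mod_lt x (b := 1) one_pos
  omega

lemma main_eq_deg (n : Int) (m : List Int) (hlen : 1 ≤ m.length)
    (h0 : m.getD 0 0 ≠ 0) : main_job n 1 m = main_job_alt n 1 m := by
  have hget : PySem.List.pyGetD m 0 0 = m.getD 0 0 := by
    rw [show (0:Int) = ((0:Nat):Int) from rfl, PySem.List.pyGetD_natCast]
  -- A side
  have hA : main_job n 1 m = 1 := by
    simp only [main_job]
    rw [PySem.List.pyRange_one_eq_nil (by norm_num)]
    simp only [List.foldl_nil]
    rw [show PySem.List.pyRepeat [(0:Int)] 1 = [0] from rfl]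
    simp only [simLoop]
    simp only [show PySem.List.min? [(0:Int)] (fun x => x) = some 0 from rfl,
      Option.getD_some,
      show PySem.List.index? [(0:Int)] (0:Int) = some 0 from rfl,
      Nat.cast_zero, hget,
      show ([(0:Int)].set 0 (([(0:Int)].getD 0 0) + m.getD 0 0)) = [m.getD 0 0] by simp,
      show PySem.List.pyRange 0 1 = [(0:Int)] by decide,
      List.foldl_cons, List.foldl_nil,
      show PySem.List.pyGetD [m.getD 0 0] (0:Int) 0 = m.getD 0 0 from rfl,
      ne_eq, eq_self_iff_true, not_true, if_false, if_true, ite_self,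
      List.nil_append]
    rw [show (([(0:Int)].length : Nat) : Int) = 1 by simp, mod_one_self]
    rfl
  -- B side
  have hB : main_job_alt n 1 m = 1 := by
    simp only [main_job_alt]
    rw [PySem.List.pyRange_one_eq_nil (by norm_num)]
    simp only [List.foldl_nil]
    rw [hget]
    have hr01 : PySem.List.pyRange 0 1 = [(0:Int)] := by decide
    rw [hr01]
    simp only [List.flatMap_cons, List.flatMap_nil, List.append_nil]
    rw [hget, floordiv_self _ h0, hr01]
    simp only [List.map_cons, List.map_nil, zero_mul]
    rw [show PySem.List.sorted2 [((0:Int),(0:Int))] (fun p => p.1) (fun p => p.2) = [(0,0)] from rfl]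
    rw [show (([((0:Int),(0:Int))].length : Nat) : Int) = 1 by simp, mod_one_self]
    rfl
  rw [hA, hB]

-- ===== VERDICT (by name: the statement is the Claim_ definition above) =====
theorem main_job_spec : Claim_equal_main_job := by
  intro n b m _ hpre
  obtain ⟨h1, h2, h3⟩ := hpre
  rcases h3 with h3 | ⟨rfl, h0⟩
  · exact main_eq n b m h1 h2 h3
  · exact main_eq_deg n m (by omega) h0
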